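-- pv_equiv track=rewrite | github.com/jishnucv/COFGen | monomer_reverse_engineer.py | _make_formula
-- ===== SOURCE A (Python) =====
-- from collections import Counter, defaultdict
--
-- def _make_formula(el_count: Counter) -> str:
--     order = ["C","H","N","O","S","B","F","Cl","Br"]
--     parts = []
--     for el in order:
--         if el_count.get(el,0):
--             parts.append(f"{el}{el_count[el]}" if el_count[el]>1 else el)
--     for el, cnt in sorted(el_count.items()):
--         if el not in order and cnt:
--             parts.append(f"{el}{cnt}" if cnt>1 else el)
--     return "".join(parts)
-- ===== SOURCE B (Python) =====
-- def _make_formula(el_count) -> str: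
--     # One key-sorted pass: priority elements sort by rank (a single low char),
--     # all others after them, alphabetically (prefixed by chr(len(order))).
--     order = ["C","H","N","O","S","B","F","Cl","Br"]
--     def key(item):
--         el = item[0]
--         return chr(order.index(el)) if el in order else chr(len(order)) + el
--     parts = []
--     for el, cnt in sorted(el_count.items(), key=key):
--         if cnt:
--             parts.append(f"{el}{cnt}" if cnt > 1 else el)
--     return "".join(parts)
-- ===== Notes on version B (the rewrite author's own statement) =====
-- stated objective: simpler
-- what changed: A's two separate output loops (a fixed-order scan with dict lookups, then an alphabetical scan over sorted items) are replaced by a single pass over the items sorted once under a priority key (rank character for the nine fixed elements, chr(9)+name for the rest).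
import Mathlib
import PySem

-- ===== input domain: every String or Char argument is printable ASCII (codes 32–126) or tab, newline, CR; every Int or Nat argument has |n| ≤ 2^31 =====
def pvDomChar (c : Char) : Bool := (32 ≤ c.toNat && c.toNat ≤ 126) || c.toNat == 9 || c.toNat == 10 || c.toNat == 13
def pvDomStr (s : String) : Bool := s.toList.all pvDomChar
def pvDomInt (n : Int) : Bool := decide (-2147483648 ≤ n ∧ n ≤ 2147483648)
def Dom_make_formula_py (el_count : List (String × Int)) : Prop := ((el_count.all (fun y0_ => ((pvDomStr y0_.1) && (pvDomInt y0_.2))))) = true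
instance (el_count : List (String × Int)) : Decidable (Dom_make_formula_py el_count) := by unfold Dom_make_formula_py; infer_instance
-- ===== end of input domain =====

-- B replaces A's two output loops (fixed-order scan + alphabetical scan) by a single
-- pass over the items sorted once under a priority key: simpler, same cost.

-- the fixed element order, a module-level constant shared by both Pythons' local `order`
def pvOrder : List String := ["C", "H", "N", "O", "S", "B", "F", "Cl", "Br"]

-- ===== PORT A =====
def make_formula_py (el_count : List (String × Int)) : String :=
  let d : PySem.Dict String Int := PySem.Dict.ofList el_count
  -- first loop: for el in order: if el_count.get(el,0): parts.append(...)
  let parts := pvOrder.foldl (fun parts el =>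
    if (d.getD el 0) != 0 then
      parts ++ [if d.getD el 0 > 1 then el ++ PySem.Int.toStr (d.getD el 0) else el]
    else parts) ([] : List String)
  -- second loop: for el, cnt in sorted(el_count.items()): … — keys of a dict are
  -- distinct, so sorting the (el, cnt) pairs lexicographically = sorting by el (exact here)
  let parts := (PySem.List.sorted d.items (fun p => p.1)).foldl (fun parts p =>
    if !(pvOrder.contains p.1) && p.2 != 0 then
      parts ++ [if p.2 > 1 then p.1 ++ PySem.Int.toStr p.2 else p.1]
    else parts) parts
  PySem.Str.join "" parts

-- ===== PORT B =====
-- key(item): chr(order.index(el)) if el in order else chr(len(order)) + el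
-- (chr(n) ported by hand as the one-character string of code point n — exact)
def pvKeyB (p : String × Int) : String :=
  if pvOrder.contains p.1 then
    String.ofList [Char.ofNat ((PySem.List.index? pvOrder p.1).getD 0)]
  else
    String.ofList (Char.ofNat pvOrder.length :: p.1.toList)

def make_formula_py_alt (el_count : List (String × Int)) : String :=
  let d : PySem.Dict String Int := PySem.Dict.ofList el_count
  let parts := (PySem.List.sorted d.items pvKeyB).foldl (fun parts p =>
    if p.2 != 0 then
      parts ++ [if p.2 > 1 then p.1 ++ PySem.Int.toStr p.2 else p.1]
    else parts) ([] : List String)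
  PySem.Str.join "" parts

-- ===== PRECONDITION & SPEC =====
def Spec_make_formula_py (el_count : List (String × Int)) (out : String) : Prop := out = make_formula_py_alt el_count
instance (el_count : List (String × Int)) (out : String) : Decidable (Spec_make_formula_py el_count out) := by unfold Spec_make_formula_py; infer_instance

-- ===== CLAIM (what is proved, stated in full; the proofs are below) =====
def Claim_equal_make_formula_py : Prop := ∀ (el_count : List (String × Int)), Dom_make_formula_py el_count → Spec_make_formula_py el_count (make_formula_py el_count)

-- ===== LEMMAS AND PROOFS =====

-- single-character strings compare by their character
theorem pv_singleton_lt (a b : Char) (h : a < b) : String.ofList [a] < String.ofList [b] := by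
  rw [String.lt_iff_toList_lt]
  simp only [String.toList_ofList]
  exact List.cons_lt_cons_iff.mpr (Or.inl h)

-- a string headed by a smaller character is smaller, whatever the tails
theorem pv_head_lt (a b : Char) (t : List Char) (h : a < b) :
    String.ofList [a] < String.ofList (b :: t) := by
  rw [String.lt_iff_toList_lt]
  simp only [String.toList_ofList]
  exact List.cons_lt_cons_iff.mpr (Or.inl h)

-- equal heads: compare the tails
theorem pv_tail_lt (c : Char) (s t : String) (h : s < t) :
    String.ofList (c :: s.toList) < String.ofList (c :: t.toList) := by
  rw [String.lt_iff_toList_lt]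
  simp only [String.toList_ofList]
  exact List.cons_lt_cons_iff.mpr (Or.inr ⟨rfl, String.lt_iff_toList_lt.mp h⟩)

-- the priority keys of the nine fixed elements are strictly increasing along pvOrder
theorem pv_pairwise_key : pvOrder.Pairwise (fun a b => pvKeyB (a, 0) < pvKeyB (b, 0)) := by
  simp only [pvOrder, List.pairwise_cons, List.mem_cons, List.not_mem_nil, or_false,
    false_implies, implies_true]
  repeat' apply And.intro
  all_goals first
    | exact List.Pairwise.nil
    | exact trivial
    | (intro a ha
       rcases ha with h|h|h|h|h|h|h|h|h <;> (try cases h) <;>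
         exact pv_singleton_lt _ _ (by decide))

-- any priority key is below any non-priority key
theorem pv_key_cross (a : String × Int) (ha : a.1 ∈ pvOrder) (t : List Char) :
    pvKeyB a < String.ofList (Char.ofNat pvOrder.length :: t) := by
  obtain ⟨el, v⟩ := a
  simp only [pvOrder, List.mem_cons, List.not_mem_nil, or_false] at ha
  rcases ha with h|h|h|h|h|h|h|h|h <;> subst h <;> refine pv_head_lt _ _ t ?_ <;>
    first
      | exact (by decide : Char.ofNat 0 < Char.ofNat 9)
      | exact (by decide : Char.ofNat 1 < Char.ofNat 9)
      | exact (by decide : Char.ofNat 2 < Char.ofNat 9)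
      | exact (by decide : Char.ofNat 3 < Char.ofNat 9)
      | exact (by decide : Char.ofNat 4 < Char.ofNat 9)
      | exact (by decide : Char.ofNat 5 < Char.ofNat 9)
      | exact (by decide : Char.ofNat 6 < Char.ofNat 9)
      | exact (by decide : Char.ofNat 7 < Char.ofNat 9)
      | exact (by decide : Char.ofNat 8 < Char.ofNat 9)

-- a count that survives the truthiness test is a key the dict contains
theorem pv_ne_imp_contains (d : PySem.Dict String Int) (el : String) :
    ((d.getD el 0 != 0) && d.contains el) = (d.getD el 0 != 0) := by
  rw [PySem.Dict.contains_eq_isSome_get?]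
  cases heq : d.get? el with
  | none =>
    have h0 : d.getD el 0 = 0 := by rw [PySem.Dict.getD, heq]; rfl
    rw [h0]; simp
  | some v => simp

-- THE KEY FACT: one sort under the priority key = the priority block (in pvOrder's
-- order, one entry per contained key) followed by the other items sorted by element
theorem pv_sort_split (d : PySem.Dict String Int) (hk : d.keys.Nodup) :
    PySem.List.sorted d.items pvKeyB =
      (pvOrder.filter (fun el => d.contains el)).map (fun el => (el, d.getD el 0)) ++
      (PySem.List.sorted d.items (fun p => p.1)).filter (fun p => !(pvOrder.contains p.1)) := by
  have hkeys : d.keys = d.items.map Prod.fst := rfl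
  rw [hkeys] at hk
  have hitems : d.items.Nodup := List.Nodup.of_map _ hk
  apply PySem.List.sorted_eq_of_perm_of_pairwise_lt
  · -- the right-hand side is a permutation of the items
    have hOR := List.filter_append_perm (fun p : String × Int => pvOrder.contains p.1) d.items
    refine List.Perm.trans (List.Perm.append ?_ ?_) hOR
    · -- priority block ~ items with key in pvOrder
      have hL1 : ((pvOrder.filter (fun el => d.contains el)).map
          (fun el => (el, d.getD el 0))).Nodup := by
        refine List.Nodup.map ?_ (List.Nodup.filter _ (by decide))
        intro a b h
        exact congrArg Prod.fst h
      have hO : (d.items.filter (fun p : String × Int => pvOrder.contains p.1)).Nodup :=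
        List.Nodup.filter _ hitems
      refine (List.perm_ext_iff_of_nodup hL1 hO).mpr ?_
      rintro ⟨el, v⟩
      simp only [List.mem_map, List.mem_filter]
      constructor
      · rintro ⟨a, ⟨haO, hac⟩, heq⟩
        obtain ⟨rfl, rfl⟩ := Prod.mk.injEq .. ▸ heq
        rw [PySem.Dict.contains_eq_isSome_get?] at hac
        cases hget : d.get? a with
        | none => rw [hget] at hac; simp at hac
        | some w =>
          have hmem := PySem.Dict.mem_items_of_get?_eq_some d hget
          have : d.getD a 0 = w := by simp [PySem.Dict.getD, hget]
          rw [this]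
          exact ⟨hmem, by simpa using haO⟩
      · rintro ⟨hmem, hc⟩
        have hget : d.get? el = some v :=
          (PySem.Dict.get?_eq_some_iff_mem_items d el v (hkeys ▸ hk)).mpr hmem
        refine ⟨el, ⟨by simpa using hc, ?_⟩, ?_⟩
        · rw [PySem.Dict.contains_eq_isSome_get?, hget]; rfl
        · simp [PySem.Dict.getD, hget]
    · -- remaining items, sorted, ~ items with key outside pvOrder
      exact List.Perm.filter _ (PySem.List.sorted_perm _ _ _)
  · -- the right-hand side is strictly increasing under the key
    rw [List.pairwise_append]
    refine ⟨?_, ?_, ?_⟩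
    · rw [List.pairwise_map]
      exact List.Pairwise.imp (fun h => h) (pv_pairwise_key.filter _)
    · have h1 : List.Pairwise (fun a b : String × Int => a.1 ≤ b.1)
          ((PySem.List.sorted d.items (fun p => p.1)).filter (fun p => !(pvOrder.contains p.1))) :=
        (PySem.List.sorted_pairwise _ _).filter _
      have hns : ((PySem.List.sorted d.items (fun p : String × Int => p.1)).map Prod.fst).Nodup :=
        (((PySem.List.sorted_perm d.items (fun p => p.1) false).map Prod.fst).nodup_iff).mpr hk
      have hnf : (((PySem.List.sorted d.items (fun p : String × Int => p.1)).filter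
          (fun p => !(pvOrder.contains p.1))).map Prod.fst).Nodup :=
        List.Nodup.sublist (List.Sublist.map _ List.filter_sublist) hns
      have h2 : List.Pairwise (fun a b : String × Int => a.1 ≠ b.1)
          ((PySem.List.sorted d.items (fun p => p.1)).filter (fun p => !(pvOrder.contains p.1))) :=
        List.pairwise_map.mp hnf
      refine (h1.and h2).imp_of_mem ?_
      intro a b ha hb hab
      have hca : pvOrder.contains a.1 = false := by
        have := (List.mem_filter.mp ha).2; simpa using this
      have hcb : pvOrder.contains b.1 = false := by
        have := (List.mem_filter.mp hb).2; simpa using this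
      show pvKeyB a < pvKeyB b
      rw [pvKeyB, pvKeyB, if_neg (by simpa using hca), if_neg (by simpa using hcb)]
      exact pv_tail_lt _ _ _ (lt_of_le_of_ne hab.1 hab.2)
    · intro a ha b hb
      have haO : a.1 ∈ pvOrder := by
        obtain ⟨el, hel, rfl⟩ := List.mem_map.mp ha
        exact (List.mem_filter.mp hel).1
      have hcb : pvOrder.contains b.1 = false := by
        have := (List.mem_filter.mp hb).2; simpa using this
      show pvKeyB a < pvKeyB b
      rw [show pvKeyB b = String.ofList (Char.ofNat pvOrder.length :: b.1.toList) from by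
        rw [pvKeyB, if_neg (by simpa using hcb)]]
      exact pv_key_cross a haO _

theorem make_formula_py_main (el_count : List (String × Int)) :
    make_formula_py el_count = make_formula_py_alt el_count := by
  rw [make_formula_py, make_formula_py_alt]
  have hk : (PySem.Dict.ofList el_count).keys.Nodup := PySem.Dict.nodup_keys_ofList el_count
  simp only [PySem.List.foldl_append_if, List.nil_append]
  congr 1
  rw [pv_sort_split _ hk, List.filter_append, List.map_append]
  congr 1
  · -- priority block
    rw [List.filter_map, List.filter_filter, List.map_map]
    congr 1
    apply List.filter_congr
    intro el _
    exact (pv_ne_imp_contains _ el).symm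
  · -- remaining block
    rw [List.filter_filter]
    congr 1
    apply List.filter_congr
    intro p _
    exact Bool.and_comm _ _

-- ===== VERDICT (by name: the statement is the Claim_ definition above) =====
theorem make_formula_py_spec : Claim_equal_make_formula_py := by
  intro el_count _
  unfold Spec_make_formula_py
  exact make_formula_py_main el_count
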